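-- pv_equiv track=rewrite | github.com/nivu235/Data-Structure | sample.py | calculate_measurement
-- ===== SOURCE A (Python) =====
-- def calculate_measurement(n, arr):
--     last_occurrence = {}
--     measurement = 0
--
--     for i in range(n-1, -1, -1):
--         if arr[i] not in last_occurrence:
--             last_occurrence[arr[i]] = i
--
--     for i in range(n):
--         measurement = (measurement + i + last_occurrence[arr[i]])
--
--     return measurement
-- ===== SOURCE B (Python) =====
-- def calculate_measurement(n, arr):
--     last = {}
--     count = {}
--     idx_sum = 0
--     for i in range(n):
--         v = arr[i]
--         last[v] = i
--         count[v] = count.get(v, 0) + 1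
--         idx_sum += i
--     return idx_sum + sum(count[v] * l for v, l in last.items())
-- ===== Notes on version B (the rewrite author's own statement) =====
-- stated objective: alternative
-- what changed: Replaces A's backward insert-if-absent pass plus a second per-position summation pass by a single forward pass that overwrites last[v], counts occurrences and accumulates the index sum, then aggregates count[v]*last[v] over the distinct values only.
import Mathlib
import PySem

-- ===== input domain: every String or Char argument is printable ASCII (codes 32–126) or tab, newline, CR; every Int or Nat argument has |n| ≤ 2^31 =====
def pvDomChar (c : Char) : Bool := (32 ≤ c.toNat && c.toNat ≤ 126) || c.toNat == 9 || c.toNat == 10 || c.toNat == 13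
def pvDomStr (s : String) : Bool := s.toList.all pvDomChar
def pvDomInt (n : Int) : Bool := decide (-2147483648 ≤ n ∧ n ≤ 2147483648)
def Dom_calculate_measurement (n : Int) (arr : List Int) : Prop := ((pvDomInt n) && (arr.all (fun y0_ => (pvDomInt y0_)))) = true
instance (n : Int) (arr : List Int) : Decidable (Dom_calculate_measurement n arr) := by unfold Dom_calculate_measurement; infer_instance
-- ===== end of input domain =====

-- B replaces A's backward insert-if-absent pass plus a second per-position summation pass by ONE
-- forward pass (overwrite last[v], count occurrences, accumulate the index sum) followed by an
-- aggregation over the distinct values; objective: alternative decomposition, same cost.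

-- ===== PORT A =====
def calculate_measurement (n : Int) (arr : List Int) : Int :=
  let last_occurrence : PySem.Dict Int Int :=
    (PySem.List.pyRange (n - 1) (-1) (-1)).foldl
      (fun d i =>
        if d.contains (PySem.List.pyGetD arr i 0) then d
        else d.insert (PySem.List.pyGetD arr i 0) i)
      PySem.Dict.empty
  (PySem.List.pyRange 0 n 1).foldl
    (fun measurement i =>
      measurement + i + last_occurrence.getD (PySem.List.pyGetD arr i 0) 0)
    0

-- ===== PORT B =====
def calculate_measurement_alt (n : Int) (arr : List Int) : Int :=
  let st :=
    (PySem.List.pyRange 0 n 1).foldl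
      (fun s i =>
        (s.1.insert (PySem.List.pyGetD arr i 0) i,
         s.2.1.insert (PySem.List.pyGetD arr i 0) (s.2.1.getD (PySem.List.pyGetD arr i 0) 0 + 1),
         s.2.2 + i))
      ((PySem.Dict.empty : PySem.Dict Int Int), (PySem.Dict.empty : PySem.Dict Int Int), (0 : Int))
  st.2.2 + (st.1.items.map (fun p => st.2.1.getD p.1 0 * p.2)).sum

-- ===== PRECONDITION & SPEC =====
-- Pre_ excludes exactly the inputs with n > len(arr), on which Python A raises IndexError.
def Pre_calculate_measurement (n : Int) (arr : List Int) : Prop := n ≤ (arr.length : Int)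
instance (n : Int) (arr : List Int) : Decidable (Pre_calculate_measurement n arr) := by
  unfold Pre_calculate_measurement; infer_instance

def pvWitness_calculate_measurement : Int × List Int := (4, [2, 7, 2, 7])

def Spec_calculate_measurement (n : Int) (arr : List Int) (out : Int) : Prop := out = calculate_measurement_alt n arr
instance (n : Int) (arr : List Int) (out : Int) : Decidable (Spec_calculate_measurement n arr out) := by unfold Spec_calculate_measurement; infer_instance

-- ===== CLAIM (what is proved, stated in full; the proofs are below) =====
def Claim_equal_calculate_measurement : Prop := ∀ (n : Int) (arr : List Int), Dom_calculate_measurement n arr → Pre_calculate_measurement n arr → Spec_calculate_measurement n arr (calculate_measurement n arr)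

-- ===== LEMMAS AND PROOFS =====

-- first binding of key x in an association list (the value of the first pair whose key is x)
def firstVal (l : List (Int × Int)) (x : Int) : Option Int :=
  (l.find? (fun p => p.1 == x)).map (·.2)

theorem firstVal_append (l₁ l₂ : List (Int × Int)) (x : Int) :
    firstVal (l₁ ++ l₂) x = (firstVal l₁ x).or (firstVal l₂ x) := by
  simp [firstVal, List.find?_append, Option.or]
  cases l₁.find? (fun p => p.1 == x) <;> simp

-- the overwrite fold (B's last dict): lookup = last binding = first binding of the reverse
theorem get?_foldl_insert (ps : List (Int × Int)) (d0 : PySem.Dict Int Int) (x : Int) :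
    (ps.foldl (fun d p => d.insert p.1 p.2) d0).get? x
      = (firstVal ps.reverse x).or (d0.get? x) := by
  induction ps generalizing d0 with
  | nil => simp [firstVal]
  | cons p ps ih =>
      simp only [List.foldl_cons, List.reverse_cons, firstVal_append, ih]
      rw [Option.or_assoc]
      congr 1
      by_cases h : x = p.1
      · subst h
        simp [firstVal, PySem.Dict.get?_insert_self, Option.or]
      · have hne : p.1 ≠ x := fun he => h he.symm
        simp [firstVal, PySem.Dict.get?_insert_of_ne _ _ h, Option.or, hne]

-- the insert-if-absent fold (A's dict): lookup = existing binding, else first binding of the list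
theorem get?_foldl_setdefault (qs : List (Int × Int)) (d0 : PySem.Dict Int Int) (x : Int) :
    (qs.foldl (fun d p => if d.contains p.1 then d else d.insert p.1 p.2) d0).get? x
      = (d0.get? x).or (firstVal qs x) := by
  induction qs generalizing d0 with
  | nil => simp [firstVal]
  | cons p qs ih =>
      simp only [List.foldl_cons, ih]
      by_cases h : x = p.1
      · by_cases hc : d0.contains p.1
        · have hs : (d0.get? p.1).isSome := by
            rw [PySem.Dict.contains_eq_isSome_get?] at hc; exact hc
          obtain ⟨v, hv⟩ := Option.isSome_iff_exists.mp hs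
          simp [hc, h, hv, firstVal, Option.or]
        · have hn : d0.get? p.1 = none := by
            rw [PySem.Dict.contains_eq_isSome_get?] at hc
            simpa using hc
          simp [hc, h, hn, PySem.Dict.get?_insert_self, firstVal, Option.or]
      · have hne : p.1 ≠ x := fun he => h he.symm
        by_cases hc : d0.contains p.1 <;>
          simp [hc, PySem.Dict.get?_insert_of_ne _ _ h, firstVal, Option.or, hne]

-- grouping: summing g over vs equals summing count(k) * g(k) over a superset of distinct keys
theorem sum_pick (K : List Int) (g : Int → Int) (x : Int) (hx : x ∈ K) (hnd : K.Nodup) :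
    (K.map (fun k => if k = x then g k else 0)).sum = g x := by
  induction K with
  | nil => cases hx
  | cons a K ih =>
      rcases List.mem_cons.mp hx with h | h
      · subst h
        have hx' : x ∉ K := (List.nodup_cons.mp hnd).1
        have hz : ∀ k ∈ K, (if k = x then g k else 0) = 0 := by
          intro k hk
          have hke : k ≠ x := fun he => hx' (he ▸ hk)
          simp [hke]
        simp [List.map_congr_left hz]
      · have ha : a ≠ x := fun he => (List.nodup_cons.mp hnd).1 (by rw [he]; exact h)
        simp [ha, ih h (List.nodup_cons.mp hnd).2]

theorem sum_group (K : List Int) (g : Int → Int) (vs : List Int)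
    (hnd : K.Nodup) (hsub : ∀ x ∈ vs, x ∈ K) :
    (K.map (fun k => (vs.count k : Int) * g k)).sum = (vs.map g).sum := by
  induction vs with
  | nil => simp
  | cons x vs ih =>
      have hcount : ∀ k, ((x :: vs).count k : Int)
          = (vs.count k : Int) + (if k = x then 1 else 0) := by
        intro k
        by_cases h : k = x
        · simp [h]
        · simp [h, Ne.symm h]
      have hsplit : (K.map (fun k => ((x :: vs).count k : Int) * g k)).sum
          = (K.map (fun k => (vs.count k : Int) * g k)).sum
            + (K.map (fun k => if k = x then g k else 0)).sum := by
        rw [← PySem.List.sum_map_add_int]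
        refine congrArg List.sum (List.map_congr_left ?_)
        intro k _
        rw [hcount k]
        by_cases h : k = x
        · simp [h]; ring
        · simp [h]
      rw [hsplit, sum_pick K g x (hsub x (List.mem_cons_self)) hnd,
        ih (fun y hy => hsub y (List.mem_cons_of_mem x hy))]
      simp [add_comm]

-- the two ports agree on every input (no precondition needed for the Lean terms themselves)
theorem calculate_measurement_eq (n : Int) (arr : List Int) :
    calculate_measurement n arr = calculate_measurement_alt n arr := by
  have hrev : PySem.List.pyRange (n - 1) (-1) (-1)
      = (PySem.List.pyRange 0 n 1).reverse := by
    rw [PySem.List.pyRange_neg_one_eq_reverse]; norm_num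
  simp only [calculate_measurement, calculate_measurement_alt, hrev]
  rw [PySem.List.foldl_prod_mk
        (f := fun (d : PySem.Dict Int Int) (i : Int) => d.insert (PySem.List.pyGetD arr i 0) i)
        (g := fun (t : PySem.Dict Int Int × Int) (i : Int) =>
          (t.1.insert (PySem.List.pyGetD arr i 0) (t.1.getD (PySem.List.pyGetD arr i 0) 0 + 1),
           t.2 + i)),
      PySem.List.foldl_prod_mk
        (f := fun (d : PySem.Dict Int Int) (i : Int) =>
          d.insert (PySem.List.pyGetD arr i 0) (d.getD (PySem.List.pyGetD arr i 0) 0 + 1))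
        (g := fun (acc : Int) (i : Int) => acc + i)]
  set v : Int → Int := fun i => PySem.List.pyGetD arr i 0 with hv
  set R : List Int := PySem.List.pyRange 0 n 1 with hR
  set vs : List Int := R.map v with hvs
  set lastD : PySem.Dict Int Int := R.foldl (fun d i => d.insert (v i) i) PySem.Dict.empty
    with hlast
  set countD : PySem.Dict Int Int :=
    R.foldl (fun d i => d.insert (v i) (d.getD (v i) 0 + 1)) PySem.Dict.empty with hcnt
  set DA : PySem.Dict Int Int :=
    R.reverse.foldl (fun d i => if d.contains (v i) then d else d.insert (v i) i)
      PySem.Dict.empty with hDA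
  -- lookups in A's backward insert-if-absent dict and B's forward overwrite dict agree
  have hget : ∀ x, lastD.get? x = DA.get? x := by
    intro x
    have h1 : lastD = (R.map (fun j => (v j, j))).foldl
        (fun d p => d.insert p.1 p.2) PySem.Dict.empty := by
      rw [hlast, List.foldl_map]
    have h2 : DA = (R.reverse.map (fun j => (v j, j))).foldl
        (fun d p => if d.contains p.1 then d else d.insert p.1 p.2) PySem.Dict.empty := by
      rw [hDA, List.foldl_map]
    rw [h1, h2, get?_foldl_insert, get?_foldl_setdefault]
    simp [List.map_reverse]
  have hgetD : ∀ x, lastD.getD x 0 = DA.getD x 0 := by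
    intro x
    rw [PySem.Dict.getD_eq_get?_getD, PySem.Dict.getD_eq_get?_getD, hget]
  have hnd : lastD.keys.Nodup := by
    rw [hlast]
    exact PySem.Dict.nodup_keys_foldl_insert_key R v (fun _ i => i) PySem.Dict.empty
      PySem.Dict.nodup_keys_empty
  have hkeys : lastD.keys = PySem.Set.ofList vs := by
    rw [hlast, PySem.Dict.keys_foldl_insert_key, PySem.Dict.keys_empty,
      PySem.Set.update_nil_left]
  have hsub : ∀ x ∈ vs, x ∈ lastD.keys := by
    intro x hx
    rw [hkeys]
    exact (PySem.Set.mem_ofList _ _).mpr hx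
  have hitems : lastD.items = lastD.keys.map (fun k => (k, lastD.getD k 0)) :=
    PySem.Dict.items_eq_map_keys lastD hnd 0
  have hcount : ∀ k, countD.getD k 0 = (vs.count k : Int) := by
    intro k
    have h3 : countD = vs.foldl (fun d x => d.insert x (d.getD x 0 + 1))
        PySem.Dict.empty := by
      rw [hcnt, hvs, List.foldl_map]
    rw [h3, PySem.Dict.getD_foldl_insert_add_one]
    simp
  -- A's accumulation is a sum over positions
  have hA : R.foldl (fun m i => m + i + DA.getD (v i) 0) 0
      = (R.map (fun i => i)).sum + (vs.map (fun x => lastD.getD x 0)).sum := by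
    rw [PySem.List.foldl_congr_mem R _ (fun m i => m + (i + DA.getD (v i) 0)) 0
        (by intro acc x _; ring),
      PySem.List.foldl_add R (fun i => i + DA.getD (v i) 0) 0, zero_add,
      PySem.List.sum_map_add_int R (fun i => i) (fun i => DA.getD (v i) 0),
      hvs, List.map_map]
    simp only [Function.comp_def, hgetD]
  -- B's grouped aggregation is the same sum over positions
  have hB : (lastD.items.map (fun p => countD.getD p.1 0 * p.2)).sum
      = (vs.map (fun x => lastD.getD x 0)).sum := by
    rw [hitems, List.map_map]
    have : (fun k => countD.getD k 0 * lastD.getD k 0)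
        = fun k => (vs.count k : Int) * lastD.getD k 0 := by
      funext k; rw [hcount]
    calc (lastD.keys.map ((fun p : Int × Int => countD.getD p.1 0 * p.2)
            ∘ fun k => (k, lastD.getD k 0))).sum
        = (lastD.keys.map (fun k => (vs.count k : Int) * lastD.getD k 0)).sum := by
          simp only [Function.comp_def]; rw [this]
      _ = (vs.map (fun x => lastD.getD x 0)).sum :=
          sum_group lastD.keys (fun k => lastD.getD k 0) vs hnd hsub
  have hIdx : R.foldl (fun acc i => acc + i) 0 = (R.map (fun i => i)).sum := by
    rw [PySem.List.foldl_add R (fun i => i) 0, zero_add]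
  rw [hA, hIdx, hB]

-- ===== VERDICT (by name: the statement is the Claim_ definition above) =====
theorem calculate_measurement_spec : Claim_equal_calculate_measurement := by
  intro n arr _ _
  unfold Spec_calculate_measurement
  exact calculate_measurement_eq n arr
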